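-- pv_equiv track=rewrite | github.com/Subomolemu/Python_Basic | Module20/02_universal_prog_2/main.py | crypto
-- ===== SOURCE A (Python) =====
-- def is_prime(num):
--     k = 0
--     for i_num in range(2, num // 2 + 1):
--         if num % i_num == 0:
--             k += 1
--     if k == 0:
--         return num
--     else:
--         return 0
--
-- def crypto(string):
--     lst = []
--     block = (0, 1)
--     for i, sym in enumerate(string):
--         if i in block:
--             continue
--         if is_prime(i) == 0:
--             continue
--         else:
--             lst.append(sym)
--     return lst
-- ===== SOURCE B (Python) =====
-- def crypto(string):
--     # Incremental trial division by previously found primes (only those p with p*p <= i):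
--     # each index is tested against O(sqrt(i)/log i) primes instead of all numbers up to i//2.
--     primes = []
--     out = []
--     for i, sym in enumerate(string):
--         if i < 2:
--             continue
--         is_p = True
--         for p in primes:
--             if p * p > i:
--                 break
--             if i % p == 0:
--                 is_p = False
--                 break
--         if is_p:
--             primes.append(i)
--             out.append(sym)
--     return out
-- ===== Notes on version B (the rewrite author's own statement) =====
-- stated objective: faster
-- what changed: A tests each index by counting ALL divisors up to i//2; B incrementally maintains the list of prime indices found so far and tests each index only against those primes p with p*p <= i, stopping early at the first hit.
import Mathlib
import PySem

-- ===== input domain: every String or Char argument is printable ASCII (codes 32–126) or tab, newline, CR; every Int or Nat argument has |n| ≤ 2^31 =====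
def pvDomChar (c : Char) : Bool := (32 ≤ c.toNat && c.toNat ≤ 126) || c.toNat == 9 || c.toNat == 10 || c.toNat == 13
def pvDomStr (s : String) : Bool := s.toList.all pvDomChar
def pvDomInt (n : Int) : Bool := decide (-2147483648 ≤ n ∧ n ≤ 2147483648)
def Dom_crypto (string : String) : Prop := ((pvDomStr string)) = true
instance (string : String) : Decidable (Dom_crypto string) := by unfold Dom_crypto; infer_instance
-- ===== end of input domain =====

-- B replaces A's per-index divisor count up to i//2 by an incrementally built list of prime
-- indices, testing each index only against primes p with p*p ≤ i (objective: faster).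

-- ===== PORT A =====
-- is_prime(num): counts divisors of num in range(2, num//2+1); returns num if none, else 0
def is_prime (num : Int) : Int :=
  let k : Int :=
    (PySem.List.pyRange 2 (PySem.Int.floordiv num 2 + 1) 1).foldl
      (fun k i_num => if PySem.Int.mod num i_num == 0 then k + 1 else k) 0
  if k = 0 then num else 0

def crypto (string : String) : List String :=
  let block : Int × Int := (0, 1)
  (PySem.List.enumerate string.toList).foldl
    (fun lst p =>
      if p.1 = block.1 ∨ p.1 = block.2 then lst
      else if is_prime p.1 = 0 then lst
      else lst ++ [String.ofList [p.2]]) []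

-- ===== PORT B =====
-- inner 'for p in primes' loop with its two breaks
def trialLoop (i : Int) : List Int → Bool
  | [] => true
  | p :: ps =>
    if p * p > i then true
    else if PySem.Int.mod i p == 0 then false
    else trialLoop i ps

def crypto_alt (string : String) : List String :=
  let st :=
    (PySem.List.enumerate string.toList).foldl
      (fun (st : List Int × List String) p =>
        if p.1 < 2 then st
        else if trialLoop p.1 st.1 then (st.1 ++ [p.1], st.2 ++ [String.ofList [p.2]])
        else st) ([], [])
  st.2

-- ===== PRECONDITION & SPEC =====
def Spec_crypto (string : String) (out : List String) : Prop := out = crypto_alt string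
instance (string : String) (out : List String) : Decidable (Spec_crypto string out) := by unfold Spec_crypto; infer_instance

-- ===== CLAIM (what is proved, stated in full; the proofs are below) =====
def Claim_equal_crypto : Prop := ∀ (string : String), Dom_crypto string → Spec_crypto string (crypto string)

-- ===== LEMMAS AND PROOFS =====

-- the common specification: characters at prime indices, in order
def collectPrimes : Nat → List Char → List String
  | _, [] => []
  | n, c :: cs => (if Nat.Prime n then [String.ofList [c]] else []) ++ collectPrimes (n + 1) cs

-- n ≥ 2 has no divisor d with 2 ≤ d ≤ n/2 iff it is prime
lemma noMidFactor_iff_prime (n : Nat) (h2 : 2 ≤ n) :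
    (∀ d : Nat, 2 ≤ d → d ≤ n / 2 → ¬ d ∣ n) ↔ Nat.Prime n := by
  constructor
  · intro h
    by_contra hnp
    have hp : Nat.Prime n.minFac := Nat.minFac_prime (by omega)
    have hsq : n.minFac ^ 2 ≤ n := Nat.minFac_sq_le_self (by omega) hnp
    have h2p : 2 ≤ n.minFac := hp.two_le
    have hle : n.minFac ≤ n / 2 := by
      rw [Nat.le_div_iff_mul_le (by omega)]
      nlinarith [sq_nonneg n.minFac]
    exact h n.minFac h2p hle (Nat.minFac_dvd n)
  · intro hp d hd2 hdle hdvd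
    rcases (Nat.Prime.eq_one_or_self_of_dvd hp d hdvd) with h1 | hn
    · omega
    · have : n / 2 < n := Nat.div_lt_self (by omega) (by omega)
      omega
lemma is_prime_eq_zero_iff (n : Nat) (h2 : 2 ≤ n) :
    is_prime (n : Int) = 0 ↔ ¬ Nat.Prime n := by
  unfold is_prime
  rw [show PySem.Int.floordiv (n : Int) 2 = ((n / 2 : Nat) : Int) from
        (by exact_mod_cast PySem.Int.floordiv_natCast n 2)]
  rw [PySem.List.foldl_count_if]
  have hn0 : (n : Int) ≠ 0 := by exact_mod_cast (by omega : n ≠ 0)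
  set L := PySem.List.pyRange 2 (((n / 2 : Nat) : Int) + 1) 1 with hL
  set f : Int → Bool := fun i_num => PySem.Int.mod (n : Int) i_num == 0 with hf
  have hiff : L.countP f = 0 ↔ Nat.Prime n := by
    rw [← noMidFactor_iff_prime n h2]
    constructor
    · intro h0 d hd2 hdle hdvd
      have hmem : ((d : Int)) ∈ L := by
        rw [hL, PySem.List.mem_pyRange_one]
        constructor
        · exact_mod_cast hd2
        · exact_mod_cast Nat.lt_succ_of_le hdle
      have hfd : f (d : Int) = true := by
        simp [hf, PySem.Int.mod_eq_zero_iff_dvd]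
        exact_mod_cast hdvd
      have := List.countP_pos_iff.mpr ⟨(d : Int), hmem, hfd⟩
      omega
    · intro hall
      rw [List.countP_eq_zero]
      intro x hxmem hfx
      rw [hL, PySem.List.mem_pyRange_one] at hxmem
      have hx0 : 0 ≤ x := by omega
      lift x to Nat using hx0 with d
      have hdvd : d ∣ n := by
        exact_mod_cast (show (d : Int) ∣ (n : Int) by simpa [hf, PySem.Int.mod_eq_zero_iff_dvd] using hfx)
      have hd2 : 2 ≤ d := by exact_mod_cast hxmem.1
      have hdle : d ≤ n / 2 := by
        have := hxmem.2
        have : d < n / 2 + 1 := by exact_mod_cast this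
        omega
      exact hall d hd2 hdle hdvd
  dsimp only
  split_ifs with hk
  · have hk0 : L.countP f = 0 := by omega
    simp [hiff.mp hk0]
    omega
  · have hnp : ¬ Nat.Prime n := fun hp => hk (by simp [hiff.mpr hp])
    simp [hnp]

-- invariant carried by B's fold: P is the (increasing) list of prime indices below n
def InvP (P : List Int) (n : Nat) : Prop :=
  P.Pairwise (· < ·) ∧ ∀ p : Int, p ∈ P ↔ ∃ q : Nat, Nat.Prime q ∧ q < n ∧ p = (q : Int)

lemma trialLoop_iff (i : Int) (P : List Int)
    (hs : P.Pairwise (· ≤ ·)) (hpos : ∀ p ∈ P, 2 ≤ p) :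
    trialLoop i P = true ↔ ∀ p ∈ P, p * p ≤ i → ¬ (p ∣ i) := by
  induction P with
  | nil => simp [trialLoop]
  | cons p ps ih =>
    have hps : ps.Pairwise (· ≤ ·) := hs.of_cons
    have hppos : 2 ≤ p := hpos p (List.mem_cons_self ..)
    unfold trialLoop
    split_ifs with hbig hdvd
    · -- p*p > i: all later q ≥ p also have q*q > i
      simp only [true_iff]
      intro q hq hqq
      exfalso
      rcases List.mem_cons.mp hq with rfl | hq'
      · omega
      · have hpq : p ≤ q := (List.pairwise_cons.mp hs).1 q hq'
        nlinarith
    · -- divisor found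
      simp only [false_iff]
      push_neg
      exact ⟨p, List.mem_cons_self .., by omega,
        (PySem.Int.mod_eq_zero_iff_dvd _ _).mp (by simpa using hdvd)⟩
    · rw [ih hps (fun q hq => hpos q (List.mem_cons_of_mem _ hq))]
      constructor
      · intro h q hq hqq
        rcases List.mem_cons.mp hq with rfl | hq'
        · intro hd
          exact hdvd (by simp [(PySem.Int.mod_eq_zero_iff_dvd i q).mpr hd])
        · exact h q hq' hqq
      · intro h q hq hqq
        exact h q (List.mem_cons_of_mem _ hq) hqq

lemma trialLoop_prime (n : Nat) (h2 : 2 ≤ n) (P : List Int) (hInv : InvP P n) :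
    (trialLoop (n : Int) P = true) ↔ Nat.Prime n := by
  obtain ⟨hpw, hmem⟩ := hInv
  have hpos : ∀ p ∈ P, 2 ≤ p := by
    intro p hp
    rcases (hmem p).mp hp with ⟨q, hq, _, rfl⟩
    exact_mod_cast hq.two_le
  rw [trialLoop_iff _ _ (hpw.imp (fun h => le_of_lt h)) hpos]
  constructor
  · intro h
    by_contra hnp
    have hp : Nat.Prime n.minFac := Nat.minFac_prime (by omega)
    have hsq : n.minFac ^ 2 ≤ n := Nat.minFac_sq_le_self (by omega) hnp
    have hlt : n.minFac < n := by
      have h2p := hp.two_le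
      nlinarith
    have hmemP : ((n.minFac : Int)) ∈ P := (hmem _).mpr ⟨n.minFac, hp, hlt, rfl⟩
    refine h _ hmemP ?_ ?_
    · exact_mod_cast (by nlinarith [hsq] : n.minFac * n.minFac ≤ n)
    · exact_mod_cast Nat.minFac_dvd n
  · intro hp q hq hqq hqd
    rcases (hmem q).mp hq with ⟨m, hm, hmlt, rfl⟩
    have : m ∣ n := by exact_mod_cast hqd
    rcases hp.eq_one_or_self_of_dvd m this with h1 | hn
    · exact absurd h1 (by have := hm.two_le; omega)
    · omega

-- A's fold accumulates collectPrimes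
lemma cryptoA_fold (cs : List Char) : ∀ (n : Nat) (acc : List String),
    (PySem.List.enumerate cs (n : Int)).foldl
      (fun lst p =>
        if p.1 = ((0 : Int), (1 : Int)).1 ∨ p.1 = ((0 : Int), (1 : Int)).2 then lst
        else if is_prime p.1 = 0 then lst
        else lst ++ [String.ofList [p.2]]) acc
      = acc ++ collectPrimes n cs := by
  induction cs with
  | nil => intro n acc; simp [PySem.List.enumerate_nil, collectPrimes]
  | cons c cs ih =>
    intro n acc
    rw [PySem.List.enumerate_cons, List.foldl_cons,
        show ((n : Int) + 1) = ((n + 1 : Nat) : Int) by push_cast; ring]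
    by_cases hsmall : n < 2
    · have hcond : ((n : Int) = 0 ∨ (n : Int) = 1) := by
        interval_cases n
        · exact Or.inl rfl
        · exact Or.inr rfl
      have hnp : ¬ Nat.Prime n := by
        interval_cases n <;> decide
      simp only [hcond, if_pos, ih]
      simp [collectPrimes, hnp]
    · push_neg at hsmall
      have hcond : ¬ ((n : Int) = 0 ∨ (n : Int) = 1) := by omega
      simp only [hcond, if_neg, if_false, ite_false]
      by_cases hp : Nat.Prime n
      · have : ¬ is_prime (n : Int) = 0 := by
          rw [is_prime_eq_zero_iff n hsmall]; exact not_not_intro hp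
        simp only [this, if_neg, if_false, ite_false, ih]
        simp [collectPrimes, hp]
      · have : is_prime (n : Int) = 0 := (is_prime_eq_zero_iff n hsmall).mpr hp
        simp only [this, if_pos, ite_true, ih]
        simp [collectPrimes, hp]

-- B's fold accumulates collectPrimes too, maintaining InvP on the prime list
lemma cryptoB_fold (cs : List Char) : ∀ (n : Nat) (P : List Int) (out : List String),
    InvP P n →
    ((PySem.List.enumerate cs (n : Int)).foldl
      (fun (st : List Int × List String) p =>
        if p.1 < 2 then st
        else if trialLoop p.1 st.1 then (st.1 ++ [p.1], st.2 ++ [String.ofList [p.2]])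
        else st) (P, out)).2
      = out ++ collectPrimes n cs := by
  induction cs with
  | nil => intro n P out _; simp [PySem.List.enumerate_nil, collectPrimes]
  | cons c cs ih =>
    intro n P out hInv
    rw [PySem.List.enumerate_cons, List.foldl_cons,
        show ((n : Int) + 1) = ((n + 1 : Nat) : Int) by push_cast; ring]
    by_cases hsmall : n < 2
    · have hcond : ((n : Int) < 2) := by exact_mod_cast hsmall
      have hnp : ¬ Nat.Prime n := by interval_cases n <;> decide
      have hInv' : InvP P (n + 1) := by
        obtain ⟨hpw, hmem⟩ := hInv
        refine ⟨hpw, fun p => (hmem p).trans ?_⟩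
        constructor
        · rintro ⟨q, hq, hlt, rfl⟩; exact ⟨q, hq, by omega, rfl⟩
        · rintro ⟨q, hq, hlt, rfl⟩
          refine ⟨q, hq, ?_, rfl⟩
          have := hq.two_le
          omega
      simp only [hcond, if_pos, ite_true, ih _ _ _ hInv']
      simp [collectPrimes, hnp]
    · push_neg at hsmall
      have hcond : ¬ ((n : Int) < 2) := by exact_mod_cast not_lt.mpr hsmall
      simp only [hcond, if_neg, ite_false]
      by_cases hp : Nat.Prime n
      · have htl : trialLoop (n : Int) P = true := (trialLoop_prime n hsmall P hInv).mpr hp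
        have hInv' : InvP (P ++ [(n : Int)]) (n + 1) := by
          obtain ⟨hpw, hmem⟩ := hInv
          constructor
          · rw [List.pairwise_append]
            refine ⟨hpw, List.pairwise_singleton _ _, ?_⟩
            intro p hpP q hq
            rcases List.mem_singleton.mp hq with rfl
            rcases (hmem p).mp hpP with ⟨m, _, hmlt, rfl⟩
            exact_mod_cast hmlt
          · intro p
            rw [List.mem_append, List.mem_singleton, hmem]
            constructor
            · rintro (⟨q, hq, hlt, rfl⟩ | rfl)
              · exact ⟨q, hq, by omega, rfl⟩
              · exact ⟨n, hp, by omega, rfl⟩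
            · rintro ⟨q, hq, hlt, rfl⟩
              by_cases hqn : q = n
              · subst hqn; exact Or.inr rfl
              · exact Or.inl ⟨q, hq, by omega, rfl⟩
        simp only [htl, if_pos, ih _ _ _ hInv']
        simp [collectPrimes, hp]
      · have htl : ¬ trialLoop (n : Int) P = true := by
          rw [trialLoop_prime n hsmall P hInv]; exact hp
        have hInv' : InvP P (n + 1) := by
          obtain ⟨hpw, hmem⟩ := hInv
          refine ⟨hpw, fun p => (hmem p).trans ?_⟩
          constructor
          · rintro ⟨q, hq, hlt, rfl⟩; exact ⟨q, hq, by omega, rfl⟩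
          · rintro ⟨q, hq, hlt, rfl⟩
            refine ⟨q, hq, ?_, rfl⟩
            by_cases hqn : q = n
            · exact absurd (hqn ▸ hq) hp
            · omega
        have htl' : trialLoop (n : Int) P = false := by
          rwa [Bool.not_eq_true] at htl
        simp only [htl', Bool.false_eq_true, ite_false, ih _ _ _ hInv']
        simp [collectPrimes, hp]

-- ===== VERDICT (by name: the statement is the Claim_ definition above) =====
theorem crypto_spec : Claim_equal_crypto := by
  intro s _
  unfold Spec_crypto crypto crypto_alt
  have hInv0 : InvP [] 0 := by
    refine ⟨List.Pairwise.nil, fun p => ?_⟩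
    simp only [List.not_mem_nil, false_iff]
    rintro ⟨q, _, hlt, _⟩
    omega
  have hA := cryptoA_fold s.toList 0 []
  have hB := cryptoB_fold s.toList 0 [] [] hInv0
  simp only [Nat.cast_zero] at hA hB
  simp only [hA, hB, List.nil_append]
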